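-- pv_equiv track=rewrite | github.com/chmltf/python-scripts | ropa_workup.py | part_of_day
-- ===== SOURCE A (Python) =====
-- def part_of_day(time_string):
--     morning = ['06', '07', '08', '09', '10', '11']
--     afternoon = ['12', '13', '14', '15', '16', '17']
--     night = ['18', '19', '20', '21', '22', '23', '00', '01', '02', '03', '04', '05']
--     morning_times = []
--     afternoon_times = []
--     night_times = []
--
--     for i in morning:
--         x = [f'{i}:00', f'{i}:15', f'{i}:30', f'{i}:45']
--         morning_times.extend(x)
--
--     for i in afternoon:
--         x = [f'{i}:00', f'{i}:15', f'{i}:30', f'{i}:45']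
--         afternoon_times.extend(x)
--
--     for i in night:
--         x = [f'{i}:00', f'{i}:15', f'{i}:30', f'{i}:45']
--         night_times.extend(x)
--
--     time_of_day = []
--     for i in time_string:
--         if i in morning_times:
--             time_of_day.append('morning')
--         elif i in afternoon_times:
--             time_of_day.append('afternoon')
--         elif i in night_times:
--             time_of_day.append('night')
--         else:
--             time_of_day.append('do not recognize')
--     return time_of_day
-- ===== SOURCE B (Python) =====
-- _DIGITS = '0123456789'
--
--
-- def _classify(t):
--     if len(t) == 5 and t[2] == ':' and t[0] in _DIGITS and t[1] in _DIGITS \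
--             and t[3:] in ('00', '15', '30', '45'):
--         h = int(t[:2])
--         if 6 <= h <= 11:
--             return 'morning'
--         if 12 <= h <= 17:
--             return 'afternoon'
--         if h <= 23:
--             return 'night'
--     return 'do not recognize'
--
--
-- def part_of_day(time_string):
--     return [_classify(t) for t in time_string]
-- ===== Notes on version B (the rewrite author's own statement) =====
-- stated objective: faster
-- what changed: B drops A's construction of three precomputed 96-entry 'HH:MM' membership tables and instead classifies each element directly by parsing it as a 5-character HH:MM string (two digits, ':', minutes in {00,15,30,45}) and mapping the hour value by range.
import Mathlib
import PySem

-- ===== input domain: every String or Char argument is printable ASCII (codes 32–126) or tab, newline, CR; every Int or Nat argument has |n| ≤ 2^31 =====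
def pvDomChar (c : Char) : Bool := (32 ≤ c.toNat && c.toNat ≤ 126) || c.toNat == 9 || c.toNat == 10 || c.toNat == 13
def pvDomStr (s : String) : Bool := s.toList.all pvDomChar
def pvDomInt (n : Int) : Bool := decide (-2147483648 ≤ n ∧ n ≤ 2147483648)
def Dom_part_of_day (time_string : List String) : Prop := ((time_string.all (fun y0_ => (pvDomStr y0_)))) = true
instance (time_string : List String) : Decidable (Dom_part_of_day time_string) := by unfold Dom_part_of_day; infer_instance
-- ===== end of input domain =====

-- B replaces A's three precomputed 'HH:MM' membership tables by direct per-element parsing of the string (objective: faster; a timing run measured B faster).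

-- ===== PORT A =====
-- the three hour lists of A
def pvA_morning : List String := ["06", "07", "08", "09", "10", "11"]
def pvA_afternoon : List String := ["12", "13", "14", "15", "16", "17"]
def pvA_night : List String := ["18", "19", "20", "21", "22", "23", "00", "01", "02", "03", "04", "05"]
-- A's three accumulation loops ('for i in …: x = [f'{i}:00', …]; ….extend(x)')
def pvA_morning_times : List String :=
  pvA_morning.foldl (fun acc i => acc ++ [i ++ ":00", i ++ ":15", i ++ ":30", i ++ ":45"]) []
def pvA_afternoon_times : List String :=
  pvA_afternoon.foldl (fun acc i => acc ++ [i ++ ":00", i ++ ":15", i ++ ":30", i ++ ":45"]) []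
def pvA_night_times : List String :=
  pvA_night.foldl (fun acc i => acc ++ [i ++ ":00", i ++ ":15", i ++ ":30", i ++ ":45"]) []
-- A's main loop: membership tests in the precomputed lists, in A's branch order
def part_of_day (time_string : List String) : List String :=
  time_string.foldl (fun acc i =>
    acc ++ [if i ∈ pvA_morning_times then "morning"
            else if i ∈ pvA_afternoon_times then "afternoon"
            else if i ∈ pvA_night_times then "night"
            else "do not recognize"]) []

-- ===== PORT B =====
def pbDigits : List Char := "0123456789".toList
-- _classify of Source B. The match on a 5-element char list is Python's 'len(t) == 5' plus the
-- indexings t[2], t[0], t[1] and slices t[:2], t[3:] of a 5-character string (exact on that shape).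
-- 'int(t[:2])' on a checked two-digit string is 10*(digit value of t[0]) + digit value of t[1] (exact).
def pbClassify (t : String) : String :=
  match t.toList with
  | [a, b, c, d, e] =>
    if c = ':' ∧ a ∈ pbDigits ∧ b ∈ pbDigits ∧
        String.ofList [d, e] ∈ ["00", "15", "30", "45"] then
      let h : Nat := 10 * (a.toNat - 48) + (b.toNat - 48)
      if 6 ≤ h ∧ h ≤ 11 then "morning"
      else if 12 ≤ h ∧ h ≤ 17 then "afternoon"
      else if h ≤ 23 then "night"
      else "do not recognize"
    else "do not recognize"
  | _ => "do not recognize"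

def part_of_day_alt (time_string : List String) : List String :=
  time_string.map pbClassify

-- ===== PRECONDITION & SPEC =====
def Spec_part_of_day (time_string : List String) (out : List String) : Prop := out = part_of_day_alt time_string
instance (time_string : List String) (out : List String) : Decidable (Spec_part_of_day time_string out) := by unfold Spec_part_of_day; infer_instance

-- ===== CLAIM (what is proved, stated in full; the proofs are below) =====
def Claim_equal_part_of_day : Prop := ∀ (time_string : List String), Dom_part_of_day time_string → Spec_part_of_day time_string (part_of_day time_string)

-- ===== LEMMAS AND PROOFS =====
lemma pv_str_eq_iff (s t : String) : s = t ↔ s.toList = t.toList := String.toList_inj.symm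

lemma pv_ofList_eq (l : List Char) (t : String) : String.ofList l = t ↔ l = t.toList := by
  rw [← String.toList_inj, String.toList_ofList]

lemma pv_foldl_append_map {α β : Type} (f : α → β) (l : List α) (acc : List β) :
    l.foldl (fun a i => a ++ [f i]) acc = acc ++ l.map f := by
  induction l generalizing acc with
  | nil => simp
  | cons x xs ih => simp [List.foldl, ih]

lemma pv_mt_lits : pvA_morning_times = ["06:00", "06:15", "06:30", "06:45", "07:00", "07:15", "07:30", "07:45", "08:00", "08:15", "08:30", "08:45", "09:00", "09:15", "09:30", "09:45", "10:00", "10:15", "10:30", "10:45", "11:00", "11:15", "11:30", "11:45"] := by decide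
lemma pv_at_lits : pvA_afternoon_times = ["12:00", "12:15", "12:30", "12:45", "13:00", "13:15", "13:30", "13:45", "14:00", "14:15", "14:30", "14:45", "15:00", "15:15", "15:30", "15:45", "16:00", "16:15", "16:30", "16:45", "17:00", "17:15", "17:30", "17:45"] := by decide
lemma pv_nt_lits : pvA_night_times = ["18:00", "18:15", "18:30", "18:45", "19:00", "19:15", "19:30", "19:45", "20:00", "20:15", "20:30", "20:45", "21:00", "21:15", "21:30", "21:45", "22:00", "22:15", "22:30", "22:45", "23:00", "23:15", "23:30", "23:45", "00:00", "00:15", "00:30", "00:45", "01:00", "01:15", "01:30", "01:45", "02:00", "02:15", "02:30", "02:45", "03:00", "03:15", "03:30", "03:45", "04:00", "04:15", "04:30", "04:45", "05:00", "05:15", "05:30", "05:45"] := by decide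

-- a string of A's morning table satisfies B's validity guard
lemma pv_memM_guard (a b c d e : Char)
    (hm : String.ofList [a, b, c, d, e] ∈ pvA_morning_times) : c = ':' ∧ (a = '0' ∨ a = '1' ∨ a = '2' ∨ a = '3' ∨ a = '4' ∨ a = '5' ∨ a = '6' ∨ a = '7' ∨ a = '8' ∨ a = '9') ∧ (b = '0' ∨ b = '1' ∨ b = '2' ∨ b = '3' ∨ b = '4' ∨ b = '5' ∨ b = '6' ∨ b = '7' ∨ b = '8' ∨ b = '9') ∧ ((d = '0' ∧ e = '0') ∨ (d = '1' ∧ e = '5') ∨ (d = '3' ∧ e = '0') ∨ (d = '4' ∧ e = '5')) := by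
  simp only [pv_mt_lits, List.mem_cons, List.not_mem_nil, or_false, pv_ofList_eq,
    show ("06:00" : String).toList = ['0', '6', ':', '0', '0'] from rfl,
    show ("06:15" : String).toList = ['0', '6', ':', '1', '5'] from rfl,
    show ("06:30" : String).toList = ['0', '6', ':', '3', '0'] from rfl,
    show ("06:45" : String).toList = ['0', '6', ':', '4', '5'] from rfl,
    show ("07:00" : String).toList = ['0', '7', ':', '0', '0'] from rfl,
    show ("07:15" : String).toList = ['0', '7', ':', '1', '5'] from rfl,
    show ("07:30" : String).toList = ['0', '7', ':', '3', '0'] from rfl,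
    show ("07:45" : String).toList = ['0', '7', ':', '4', '5'] from rfl,
    show ("08:00" : String).toList = ['0', '8', ':', '0', '0'] from rfl,
    show ("08:15" : String).toList = ['0', '8', ':', '1', '5'] from rfl,
    show ("08:30" : String).toList = ['0', '8', ':', '3', '0'] from rfl,
    show ("08:45" : String).toList = ['0', '8', ':', '4', '5'] from rfl,
    show ("09:00" : String).toList = ['0', '9', ':', '0', '0'] from rfl,
    show ("09:15" : String).toList = ['0', '9', ':', '1', '5'] from rfl,
    show ("09:30" : String).toList = ['0', '9', ':', '3', '0'] from rfl,
    show ("09:45" : String).toList = ['0', '9', ':', '4', '5'] from rfl,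
    show ("10:00" : String).toList = ['1', '0', ':', '0', '0'] from rfl,
    show ("10:15" : String).toList = ['1', '0', ':', '1', '5'] from rfl,
    show ("10:30" : String).toList = ['1', '0', ':', '3', '0'] from rfl,
    show ("10:45" : String).toList = ['1', '0', ':', '4', '5'] from rfl,
    show ("11:00" : String).toList = ['1', '1', ':', '0', '0'] from rfl,
    show ("11:15" : String).toList = ['1', '1', ':', '1', '5'] from rfl,
    show ("11:30" : String).toList = ['1', '1', ':', '3', '0'] from rfl,
    show ("11:45" : String).toList = ['1', '1', ':', '4', '5'] from rfl,
    List.cons.injEq, and_true] at hm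
  rcases hm with ⟨rfl,rfl,rfl,rfl,rfl⟩|⟨rfl,rfl,rfl,rfl,rfl⟩|⟨rfl,rfl,rfl,rfl,rfl⟩|⟨rfl,rfl,rfl,rfl,rfl⟩|⟨rfl,rfl,rfl,rfl,rfl⟩|⟨rfl,rfl,rfl,rfl,rfl⟩|⟨rfl,rfl,rfl,rfl,rfl⟩|⟨rfl,rfl,rfl,rfl,rfl⟩|⟨rfl,rfl,rfl,rfl,rfl⟩|⟨rfl,rfl,rfl,rfl,rfl⟩|⟨rfl,rfl,rfl,rfl,rfl⟩|⟨rfl,rfl,rfl,rfl,rfl⟩|⟨rfl,rfl,rfl,rfl,rfl⟩|⟨rfl,rfl,rfl,rfl,rfl⟩|⟨rfl,rfl,rfl,rfl,rfl⟩|⟨rfl,rfl,rfl,rfl,rfl⟩|⟨rfl,rfl,rfl,rfl,rfl⟩|⟨rfl,rfl,rfl,rfl,rfl⟩|⟨rfl,rfl,rfl,rfl,rfl⟩|⟨rfl,rfl,rfl,rfl,rfl⟩|⟨rfl,rfl,rfl,rfl,rfl⟩|⟨rfl,rfl,rfl,rfl,rfl⟩|⟨rfl,rfl,rfl,rfl,rfl⟩|⟨rfl,rfl,rfl,rfl,rfl⟩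 <;> decide

lemma pv_memA_guard (a b c d e : Char)
    (hm : String.ofList [a, b, c, d, e] ∈ pvA_afternoon_times) : c = ':' ∧ (a = '0' ∨ a = '1' ∨ a = '2' ∨ a = '3' ∨ a = '4' ∨ a = '5' ∨ a = '6' ∨ a = '7' ∨ a = '8' ∨ a = '9') ∧ (b = '0' ∨ b = '1' ∨ b = '2' ∨ b = '3' ∨ b = '4' ∨ b = '5' ∨ b = '6' ∨ b = '7' ∨ b = '8' ∨ b = '9') ∧ ((d = '0' ∧ e = '0') ∨ (d = '1' ∧ e = '5') ∨ (d = '3' ∧ e = '0') ∨ (d = '4' ∧ e = '5')) := by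
  simp only [pv_at_lits, List.mem_cons, List.not_mem_nil, or_false, pv_ofList_eq,
    show ("12:00" : String).toList = ['1', '2', ':', '0', '0'] from rfl,
    show ("12:15" : String).toList = ['1', '2', ':', '1', '5'] from rfl,
    show ("12:30" : String).toList = ['1', '2', ':', '3', '0'] from rfl,
    show ("12:45" : String).toList = ['1', '2', ':', '4', '5'] from rfl,
    show ("13:00" : String).toList = ['1', '3', ':', '0', '0'] from rfl,
    show ("13:15" : String).toList = ['1', '3', ':', '1', '5'] from rfl,
    show ("13:30" : String).toList = ['1', '3', ':', '3', '0'] from rfl,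
    show ("13:45" : String).toList = ['1', '3', ':', '4', '5'] from rfl,
    show ("14:00" : String).toList = ['1', '4', ':', '0', '0'] from rfl,
    show ("14:15" : String).toList = ['1', '4', ':', '1', '5'] from rfl,
    show ("14:30" : String).toList = ['1', '4', ':', '3', '0'] from rfl,
    show ("14:45" : String).toList = ['1', '4', ':', '4', '5'] from rfl,
    show ("15:00" : String).toList = ['1', '5', ':', '0', '0'] from rfl,
    show ("15:15" : String).toList = ['1', '5', ':', '1', '5'] from rfl,
    show ("15:30" : String).toList = ['1', '5', ':', '3', '0'] from rfl,
    show ("15:45" : String).toList = ['1', '5', ':', '4', '5'] from rfl,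
    show ("16:00" : String).toList = ['1', '6', ':', '0', '0'] from rfl,
    show ("16:15" : String).toList = ['1', '6', ':', '1', '5'] from rfl,
    show ("16:30" : String).toList = ['1', '6', ':', '3', '0'] from rfl,
    show ("16:45" : String).toList = ['1', '6', ':', '4', '5'] from rfl,
    show ("17:00" : String).toList = ['1', '7', ':', '0', '0'] from rfl,
    show ("17:15" : String).toList = ['1', '7', ':', '1', '5'] from rfl,
    show ("17:30" : String).toList = ['1', '7', ':', '3', '0'] from rfl,
    show ("17:45" : String).toList = ['1', '7', ':', '4', '5'] from rfl,
    List.cons.injEq, and_true] at hm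
  rcases hm with ⟨rfl,rfl,rfl,rfl,rfl⟩|⟨rfl,rfl,rfl,rfl,rfl⟩|⟨rfl,rfl,rfl,rfl,rfl⟩|⟨rfl,rfl,rfl,rfl,rfl⟩|⟨rfl,rfl,rfl,rfl,rfl⟩|⟨rfl,rfl,rfl,rfl,rfl⟩|⟨rfl,rfl,rfl,rfl,rfl⟩|⟨rfl,rfl,rfl,rfl,rfl⟩|⟨rfl,rfl,rfl,rfl,rfl⟩|⟨rfl,rfl,rfl,rfl,rfl⟩|⟨rfl,rfl,rfl,rfl,rfl⟩|⟨rfl,rfl,rfl,rfl,rfl⟩|⟨rfl,rfl,rfl,rfl,rfl⟩|⟨rfl,rfl,rfl,rfl,rfl⟩|⟨rfl,rfl,rfl,rfl,rfl⟩|⟨rfl,rfl,rfl,rfl,rfl⟩|⟨rfl,rfl,rfl,rfl,rfl⟩|⟨rfl,rfl,rfl,rfl,rfl⟩|⟨rfl,rfl,rfl,rfl,rfl⟩|⟨rfl,rfl,rfl,rfl,rfl⟩|⟨rfl,rfl,rfl,rfl,rfl⟩|⟨rfl,rfl,rfl,rfl,rfl⟩|⟨rfl,rfl,rfl,rfl,rfl⟩|⟨rfl,rfl,rfl,rfl,rfl⟩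 <;> decide

lemma pv_memN_guard (a b c d e : Char)
    (hm : String.ofList [a, b, c, d, e] ∈ pvA_night_times) : c = ':' ∧ (a = '0' ∨ a = '1' ∨ a = '2' ∨ a = '3' ∨ a = '4' ∨ a = '5' ∨ a = '6' ∨ a = '7' ∨ a = '8' ∨ a = '9') ∧ (b = '0' ∨ b = '1' ∨ b = '2' ∨ b = '3' ∨ b = '4' ∨ b = '5' ∨ b = '6' ∨ b = '7' ∨ b = '8' ∨ b = '9') ∧ ((d = '0' ∧ e = '0') ∨ (d = '1' ∧ e = '5') ∨ (d = '3' ∧ e = '0') ∨ (d = '4' ∧ e = '5')) := by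
  simp only [pv_nt_lits, List.mem_cons, List.not_mem_nil, or_false, pv_ofList_eq,
    show ("18:00" : String).toList = ['1', '8', ':', '0', '0'] from rfl,
    show ("18:15" : String).toList = ['1', '8', ':', '1', '5'] from rfl,
    show ("18:30" : String).toList = ['1', '8', ':', '3', '0'] from rfl,
    show ("18:45" : String).toList = ['1', '8', ':', '4', '5'] from rfl,
    show ("19:00" : String).toList = ['1', '9', ':', '0', '0'] from rfl,
    show ("19:15" : String).toList = ['1', '9', ':', '1', '5'] from rfl,
    show ("19:30" : String).toList = ['1', '9', ':', '3', '0'] from rfl,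
    show ("19:45" : String).toList = ['1', '9', ':', '4', '5'] from rfl,
    show ("20:00" : String).toList = ['2', '0', ':', '0', '0'] from rfl,
    show ("20:15" : String).toList = ['2', '0', ':', '1', '5'] from rfl,
    show ("20:30" : String).toList = ['2', '0', ':', '3', '0'] from rfl,
    show ("20:45" : String).toList = ['2', '0', ':', '4', '5'] from rfl,
    show ("21:00" : String).toList = ['2', '1', ':', '0', '0'] from rfl,
    show ("21:15" : String).toList = ['2', '1', ':', '1', '5'] from rfl,
    show ("21:30" : String).toList = ['2', '1', ':', '3', '0'] from rfl,
    show ("21:45" : String).toList = ['2', '1', ':', '4', '5'] from rfl,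
    show ("22:00" : String).toList = ['2', '2', ':', '0', '0'] from rfl,
    show ("22:15" : String).toList = ['2', '2', ':', '1', '5'] from rfl,
    show ("22:30" : String).toList = ['2', '2', ':', '3', '0'] from rfl,
    show ("22:45" : String).toList = ['2', '2', ':', '4', '5'] from rfl,
    show ("23:00" : String).toList = ['2', '3', ':', '0', '0'] from rfl,
    show ("23:15" : String).toList = ['2', '3', ':', '1', '5'] from rfl,
    show ("23:30" : String).toList = ['2', '3', ':', '3', '0'] from rfl,
    show ("23:45" : String).toList = ['2', '3', ':', '4', '5'] from rfl,
    show ("00:00" : String).toList = ['0', '0', ':', '0', '0'] from rfl,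
    show ("00:15" : String).toList = ['0', '0', ':', '1', '5'] from rfl,
    show ("00:30" : String).toList = ['0', '0', ':', '3', '0'] from rfl,
    show ("00:45" : String).toList = ['0', '0', ':', '4', '5'] from rfl,
    show ("01:00" : String).toList = ['0', '1', ':', '0', '0'] from rfl,
    show ("01:15" : String).toList = ['0', '1', ':', '1', '5'] from rfl,
    show ("01:30" : String).toList = ['0', '1', ':', '3', '0'] from rfl,
    show ("01:45" : String).toList = ['0', '1', ':', '4', '5'] from rfl,
    show ("02:00" : String).toList = ['0', '2', ':', '0', '0'] from rfl,
    show ("02:15" : String).toList = ['0', '2', ':', '1', '5'] from rfl,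
    show ("02:30" : String).toList = ['0', '2', ':', '3', '0'] from rfl,
    show ("02:45" : String).toList = ['0', '2', ':', '4', '5'] from rfl,
    show ("03:00" : String).toList = ['0', '3', ':', '0', '0'] from rfl,
    show ("03:15" : String).toList = ['0', '3', ':', '1', '5'] from rfl,
    show ("03:30" : String).toList = ['0', '3', ':', '3', '0'] from rfl,
    show ("03:45" : String).toList = ['0', '3', ':', '4', '5'] from rfl,
    show ("04:00" : String).toList = ['0', '4', ':', '0', '0'] from rfl,
    show ("04:15" : String).toList = ['0', '4', ':', '1', '5'] from rfl,
    show ("04:30" : String).toList = ['0', '4', ':', '3', '0'] from rfl,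
    show ("04:45" : String).toList = ['0', '4', ':', '4', '5'] from rfl,
    show ("05:00" : String).toList = ['0', '5', ':', '0', '0'] from rfl,
    show ("05:15" : String).toList = ['0', '5', ':', '1', '5'] from rfl,
    show ("05:30" : String).toList = ['0', '5', ':', '3', '0'] from rfl,
    show ("05:45" : String).toList = ['0', '5', ':', '4', '5'] from rfl,
    List.cons.injEq, and_true] at hm
  rcases hm with ⟨rfl,rfl,rfl,rfl,rfl⟩|⟨rfl,rfl,rfl,rfl,rfl⟩|⟨rfl,rfl,rfl,rfl,rfl⟩|⟨rfl,rfl,rfl,rfl,rfl⟩|⟨rfl,rfl,rfl,rfl,rfl⟩|⟨rfl,rfl,rfl,rfl,rfl⟩|⟨rfl,rfl,rfl,rfl,rfl⟩|⟨rfl,rfl,rfl,rfl,rfl⟩|⟨rfl,rfl,rfl,rfl,rfl⟩|⟨rfl,rfl,rfl,rfl,rfl⟩|⟨rfl,rfl,rfl,rfl,rfl⟩|⟨rfl,rfl,rfl,rfl,rfl⟩|⟨rfl,rfl,rfl,rfl,rfl⟩|⟨rfl,rfl,rfl,rfl,rfl⟩|⟨rfl,rfl,rfl,rfl,rfl⟩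|⟨rfl,rfl,rfl,rfl,rfl⟩|⟨rfl,rfl,rfl,rfl,rfl⟩|⟨rfl,rfl,rfl,rfl,rfl⟩|⟨rfl,rfl,rfl,rfl,rfl⟩|⟨rfl,rfl,rfl,rfl,rfl⟩|⟨rfl,rfl,rfl,rfl,rfl⟩|⟨rfl,rfl,rfl,rfl,rfl⟩|⟨rfl,rfl,rfl,rfl,rfl⟩|⟨rfl,rfl,rfl,rfl,rfl⟩|⟨rfl,rfl,rfl,rfl,rfl⟩|⟨rfl,rfl,rfl,rfl,rfl⟩|⟨rfl,rfl,rfl,rfl,rfl⟩|⟨rfl,rfl,rfl,rfl,rfl⟩|⟨rfl,rfl,rfl,rfl,rfl⟩|⟨rfl,rfl,rfl,rfl,rfl⟩|⟨rfl,rfl,rfl,rfl,rfl⟩|⟨rfl,rfl,rfl,rfl,rfl⟩|⟨rfl,rfl,rfl,rfl,rfl⟩|⟨rfl,rfl,rfl,rfl,rfl⟩|⟨rfl,rfl,rfl,rfl,rfl⟩|⟨rfl,rfl,rfl,rfl,rfl⟩|⟨rfl,rfl,rfl,rfl,rfl⟩|⟨rfl,rfl,rfl,rfl,rfl⟩|⟨rfl,rfl,rfl,rfl,rfl⟩|⟨rfl,rfl,rfl,rfl,rfl⟩|⟨rfl,rfl,rfl,rfl,rfl⟩|⟨rfl,rfl,rfl,rfl,rfl⟩|⟨rfl,rfl,rfl,rfl,rfl⟩|⟨rfl,rfl,rfl,rfl,rfl⟩|⟨rfl,rfl,rfl,rfl,rfl⟩|⟨rfl,rfl,rfl,rfl,rfl⟩|⟨rfl,rfl,rfl,rfl,rfl⟩|⟨rfl,rfl,rfl,rfl,rfl⟩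 <;> decide

-- B's validity guard of pbClassify, written out over the five characters
lemma pv_pb_red (a b c d e : Char) :
    pbClassify (String.ofList [a, b, c, d, e]) =
      (if c = ':' ∧ (a = '0' ∨ a = '1' ∨ a = '2' ∨ a = '3' ∨ a = '4' ∨ a = '5' ∨ a = '6' ∨ a = '7' ∨ a = '8' ∨ a = '9') ∧ (b = '0' ∨ b = '1' ∨ b = '2' ∨ b = '3' ∨ b = '4' ∨ b = '5' ∨ b = '6' ∨ b = '7' ∨ b = '8' ∨ b = '9') ∧ ((d = '0' ∧ e = '0') ∨ (d = '1' ∧ e = '5') ∨ (d = '3' ∧ e = '0') ∨ (d = '4' ∧ e = '5')) then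
        if 6 ≤ 10 * (a.toNat - 48) + (b.toNat - 48) ∧ 10 * (a.toNat - 48) + (b.toNat - 48) ≤ 11 then "morning"
        else if 12 ≤ 10 * (a.toNat - 48) + (b.toNat - 48) ∧ 10 * (a.toNat - 48) + (b.toNat - 48) ≤ 17 then "afternoon"
        else if 10 * (a.toNat - 48) + (b.toNat - 48) ≤ 23 then "night" else "do not recognize"
      else "do not recognize") := by
  simp only [pbClassify, String.toList_ofList, pbDigits, pv_ofList_eq,
    show ("0123456789" : String).toList = ['0','1','2','3','4','5','6','7','8','9'] from rfl,
    show ("00" : String).toList = ['0','0'] from rfl, show ("15" : String).toList = ['1','5'] from rfl,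
    show ("30" : String).toList = ['3','0'] from rfl, show ("45" : String).toList = ['4','5'] from rfl,
    List.mem_cons, List.not_mem_nil, or_false, List.cons.injEq, and_true]

set_option maxHeartbeats 4000000 in
lemma pv_classify_eq (s : String) :
    (if s ∈ pvA_morning_times then "morning"
     else if s ∈ pvA_afternoon_times then "afternoon"
     else if s ∈ pvA_night_times then "night"
     else "do not recognize") = pbClassify s := by
  match h : s.toList with
  | [] => simp [pv_mt_lits, pv_at_lits, pv_nt_lits, pv_str_eq_iff, pbClassify, h]
  | [a] => simp [pv_mt_lits, pv_at_lits, pv_nt_lits, pv_str_eq_iff, pbClassify, h]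
  | [a, b] => simp [pv_mt_lits, pv_at_lits, pv_nt_lits, pv_str_eq_iff, pbClassify, h]
  | [a, b, c] => simp [pv_mt_lits, pv_at_lits, pv_nt_lits, pv_str_eq_iff, pbClassify, h]
  | [a, b, c, d] => simp [pv_mt_lits, pv_at_lits, pv_nt_lits, pv_str_eq_iff, pbClassify, h]
  | [a, b, c, d, e] =>
    rw [show s = String.ofList [a, b, c, d, e] by rw [← h, String.ofList_toList], pv_pb_red]
    by_cases hg : c = ':' ∧ (a = '0' ∨ a = '1' ∨ a = '2' ∨ a = '3' ∨ a = '4' ∨ a = '5' ∨ a = '6' ∨ a = '7' ∨ a = '8' ∨ a = '9') ∧ (b = '0' ∨ b = '1' ∨ b = '2' ∨ b = '3' ∨ b = '4' ∨ b = '5' ∨ b = '6' ∨ b = '7' ∨ b = '8' ∨ b = '9') ∧ ((d = '0' ∧ e = '0') ∨ (d = '1' ∧ e = '5') ∨ (d = '3' ∧ e = '0') ∨ (d = '4' ∧ e = '5'))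
    · rw [if_pos hg]
      obtain ⟨rfl, ha, hb, hde⟩ := hg
      rcases ha with rfl|rfl|rfl|rfl|rfl|rfl|rfl|rfl|rfl|rfl <;> rcases hb with rfl|rfl|rfl|rfl|rfl|rfl|rfl|rfl|rfl|rfl <;>
        rcases hde with ⟨rfl,rfl⟩|⟨rfl,rfl⟩|⟨rfl,rfl⟩|⟨rfl,rfl⟩ <;> decide
    · rw [if_neg hg, if_neg (fun hm => hg (pv_memM_guard a b c d e hm)),
          if_neg (fun hm => hg (pv_memA_guard a b c d e hm)),
          if_neg (fun hm => hg (pv_memN_guard a b c d e hm))]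
  | a :: b :: c :: d :: e :: f :: rest => simp [pv_mt_lits, pv_at_lits, pv_nt_lits, pv_str_eq_iff, pbClassify, h]

-- ===== VERDICT (by name: the statement is the Claim_ definition above) =====
theorem part_of_day_spec : Claim_equal_part_of_day := by
  intro ts _
  unfold Spec_part_of_day part_of_day part_of_day_alt
  rw [pv_foldl_append_map]
  simp only [List.nil_append]
  congr 1
  funext s
  exact pv_classify_eq s
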